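-- pv_equiv track=rewrite | github.com/cjohanson64-netizen/SCREEN | backend/tat_bridge.py | build_clusters
-- ===== SOURCE A (Python) =====
-- from typing import Any, Dict, List
--
-- def build_clusters(edges: List[Dict[str, str]]) -> Dict[str, List[str]]:
--     clusters: Dict[str, List[str]] = {}
--
--     for edge in edges:
--         if edge["relation"] != "belongsToCluster":
--             continue
--
--         cluster = edge["object"]
--         signal = edge["subject"]
--
--         if cluster not in clusters:
--             clusters[cluster] = []
--
--         clusters[cluster].append(signal)
--
--     return clusters
-- ===== SOURCE B (Python) =====
-- def build_clusters(edges):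
--     # Filter once to (cluster, signal) pairs, then group by per-key scans
--     # over the pairs, keys in first-occurrence order.
--     pairs = [(e["object"], e["subject"]) for e in edges if e["relation"] == "belongsToCluster"]
--     return {c: [s for c2, s in pairs if c2 == c]
--             for c in dict.fromkeys(c for c, _ in pairs)}
-- ===== Notes on version B (the rewrite author's own statement) =====
-- stated objective: alternative
-- what changed: Replaces the single-pass dict accumulation with a filter-to-pairs pass followed by grouping via first-occurrence key dedup and a per-key scan over the filtered pairs.
import Mathlib
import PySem

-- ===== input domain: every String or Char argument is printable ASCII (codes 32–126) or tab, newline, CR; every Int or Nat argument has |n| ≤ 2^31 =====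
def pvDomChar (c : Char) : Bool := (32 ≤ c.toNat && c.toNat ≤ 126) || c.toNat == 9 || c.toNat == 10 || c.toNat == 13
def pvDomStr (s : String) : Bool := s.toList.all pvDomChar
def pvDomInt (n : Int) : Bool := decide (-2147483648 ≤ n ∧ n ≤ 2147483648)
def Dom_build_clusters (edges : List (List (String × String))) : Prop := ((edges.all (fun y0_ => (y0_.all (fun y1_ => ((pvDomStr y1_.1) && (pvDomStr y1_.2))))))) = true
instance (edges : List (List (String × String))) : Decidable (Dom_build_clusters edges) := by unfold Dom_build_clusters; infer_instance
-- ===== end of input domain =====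

-- B regroups A's single-pass dict accumulation into a filter-to-pairs pass followed by
-- grouping (first-occurrence key dedup + per-key scan); return values are proved equal.

-- first-match lookup edge[k] with default "" (Pre_ guarantees the key is present where A reads it)
def edgeGet (e : List (String × String)) (k : String) : String :=
  (((e.find? (fun p => p.1 == k)).map (·.2)).getD "")

def edgeHas (e : List (String × String)) (k : String) : Bool :=
  e.any (fun p => p.1 == k)

-- ===== PORT A =====
def build_clusters (edges : List (List (String × String))) : List (String × List String) :=
  (edges.foldl (fun (clusters : PySem.Dict String (List String)) edge =>
      if edgeGet edge "relation" != "belongsToCluster" then clusters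
      else
        let cluster := edgeGet edge "object"
        let signal := edgeGet edge "subject"
        let clusters := if clusters.contains cluster then clusters else clusters.insert cluster []
        clusters.modify cluster [] (· ++ [signal]))
    PySem.Dict.empty).items

-- ===== PORT B =====
def build_clusters_alt (edges : List (List (String × String))) : List (String × List String) :=
  let pairs := edges.filterMap (fun e =>
    if edgeGet e "relation" == "belongsToCluster" then some (edgeGet e "object", edgeGet e "subject") else none)
  (PySem.List.dedup (pairs.map (·.1))).map (fun c =>
    (c, pairs.filterMap (fun p => if p.1 == c then some p.2 else none)))

-- ===== PRECONDITION & SPEC =====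
-- Pre_ excludes exactly the inputs on which the Python A raises KeyError: an edge without
-- the key "relation", or a belongsToCluster edge without "object" or "subject".
def Pre_build_clusters (edges : List (List (String × String))) : Prop :=
  ∀ e ∈ edges, edgeHas e "relation" = true ∧
    (edgeGet e "relation" = "belongsToCluster" →
      edgeHas e "object" = true ∧ edgeHas e "subject" = true)
instance (edges : List (List (String × String))) : Decidable (Pre_build_clusters edges) := by unfold Pre_build_clusters; infer_instance

def pvWitness_build_clusters : (List (List (String × String))) :=
  [[("relation", "belongsToCluster"), ("object", "c1"), ("subject", "s1")],
   [("relation", "other")],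
   [("relation", "belongsToCluster"), ("object", "c1"), ("subject", "s2")]]

def Spec_build_clusters (edges : List (List (String × String))) (out : List (String × List String)) : Prop := out = build_clusters_alt edges
instance (edges : List (List (String × String))) (out : List (String × List String)) : Decidable (Spec_build_clusters edges out) := by unfold Spec_build_clusters; infer_instance

-- ===== CLAIM (what is proved, stated in full; the proofs are below) =====
def Claim_equal_build_clusters : Prop := ∀ (edges : List (List (String × String))), Dom_build_clusters edges → Pre_build_clusters edges → Spec_build_clusters edges (build_clusters edges)

-- ===== LEMMAS AND PROOFS =====

-- A's per-edge update (insert-if-missing then append) is the plain modify-append step.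
lemma stepA_eq_modify (d : PySem.Dict String (List String)) (c s : String) :
    (if d.contains c then d else d.insert c []).modify c [] (· ++ [s])
      = d.modify c [] (· ++ [s]) := by
  by_cases h : d.contains c = true
  · simp [h]
  · have h' : d.contains c = false := by simpa using h
    simp only [h, Bool.false_eq_true, if_false, PySem.Dict.modify,
      PySem.Dict.getD_insert_self, PySem.Dict.getD_of_not_contains _ _ h',
      PySem.Dict.insert_insert_self]

-- A's fold over edges equals the modify-append fold over the extracted pairs.
lemma foldA_eq_fold_pairs (edges : List (List (String × String)))
    (d : PySem.Dict String (List String)) :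
    edges.foldl (fun clusters edge =>
      if edgeGet edge "relation" != "belongsToCluster" then clusters
      else
        let cluster := edgeGet edge "object"
        let signal := edgeGet edge "subject"
        let clusters := if clusters.contains cluster then clusters else clusters.insert cluster []
        clusters.modify cluster [] (· ++ [signal])) d
    = (edges.filterMap (fun e =>
        if edgeGet e "relation" == "belongsToCluster" then some (edgeGet e "object", edgeGet e "subject") else none)).foldl
        (fun d p => d.modify p.1 [] (· ++ [p.2])) d := by
  induction edges generalizing d with
  | nil => rfl
  | cons e es ih =>
    rw [List.foldl_cons, List.filterMap_cons]
    by_cases h : edgeGet e "relation" = "belongsToCluster"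
    · have h2 : (edgeGet e "relation" != "belongsToCluster") = false := by simp [h]
      simp only [h, beq_self_eq_true, if_true, List.foldl_cons]
      rw [stepA_eq_modify]
      exact ih _
    · have h2 : (edgeGet e "relation" != "belongsToCluster") = true := by simp [h]
      have h3 : (edgeGet e "relation" == "belongsToCluster") = false := by simp [h]
      simp only [h2, if_true, h3, Bool.false_eq_true, if_false]
      exact ih d

lemma filterMap_if_eq_filter_map (pairs : List (String × String)) (c : String) :
    pairs.filterMap (fun p => if p.1 == c then some p.2 else none)
      = (pairs.filter (fun p => p.1 == c)).map (·.2) := by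
  induction pairs with
  | nil => rfl
  | cons p ps ih =>
    by_cases h : p.1 = c <;> simp [h] <;> simpa using ih

-- ===== VERDICT (by name: the statement is the Claim_ definition above) =====
theorem build_clusters_spec : Claim_equal_build_clusters := by
  intro edges _ _
  unfold Spec_build_clusters build_clusters build_clusters_alt
  rw [foldA_eq_fold_pairs]
  set pairs := edges.filterMap (fun e =>
    if edgeGet e "relation" == "belongsToCluster" then some (edgeGet e "object", edgeGet e "subject") else none) with hp
  have hnd : ((pairs.foldl (fun d p => d.modify p.1 [] (· ++ [p.2])) PySem.Dict.empty).keys).Nodup :=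
    PySem.Dict.nodup_keys_foldl_modify_key pairs Prod.fst [] (fun _ p v => v ++ [p.2])
      PySem.Dict.empty (by simp)
  rw [PySem.Dict.items_eq_map_keys _ hnd []]
  have hkeys : (pairs.foldl (fun d p => d.modify p.1 [] (· ++ [p.2])) PySem.Dict.empty).keys
      = PySem.List.dedup (pairs.map (·.1)) := by
    rw [PySem.Dict.keys_foldl_modify_key pairs Prod.fst [] (fun _ p v => v ++ [p.2]) PySem.Dict.empty]
    simp [PySem.Set.update_nil_left]
  rw [hkeys]
  apply List.map_congr_left
  intro c hc
  rw [PySem.Dict.getD_foldl_modify_append, PySem.Dict.getD_empty, filterMap_if_eq_filter_map]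
  simp
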